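-- pv_equiv track=rewrite | github.com/Urban-Research-Group/parcel-data-processor | src/misc/cobb.py | convert_lines
-- ===== SOURCE A (Python) =====
-- from typing import List
--
-- def convert_lines(raw: List[str], var_columns: dict) -> None:
--     # remove commas from DAT format to convert to CSV
--     res = [line.replace(",", "") for line in raw]
--
--     # sort in decreasing order to avoid the previous insertion
--     # impacting the next insertion by changing the index
--     var_columns = sorted(var_columns, key=lambda x: x[1], reverse=True)
--
--     for line_i in range(len(res)):
--         for var in var_columns:
--             char_i = var[1]
--             res[line_i] = res[line_i][:char_i] + "," + res[line_i][char_i:]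
--             # raw[line_i] = re.sub(
--             #    r"(?<!\w) (?!\w)", "", raw[line_i]
--             # )  # removes excess whitespace
--
--     return res
-- ===== SOURCE B (Python) =====
-- from typing import List
--
--
-- def convert_lines(raw: List[str], var_columns: dict) -> None:
--     # The comma layout depends only on a line's length, so compute it once per
--     # distinct length as a template of character slots, then render each line
--     # in a single pass over its template.
--     cols = sorted((var[1] for var in var_columns), reverse=True)
--     stripped = [line.replace(",", "") for line in raw]
--     templates = {}
--     res = []
--     for s in stripped:
--         length = len(s)
--         if length not in templates:
--             slots = list(range(length))
--             for p in cols: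
--                 slots.insert(p, None)  # None marks a comma slot
--             templates[length] = slots
--         res.append("".join("," if i is None else s[i] for i in templates[length]))
--     return res
-- ===== Notes on version B (the rewrite author's own statement) =====
-- stated objective: faster
-- what changed: The comma layout depends only on a line's length, so B builds a slot template once per distinct length (memoized in a dict) and renders each line in a single pass over its template, instead of A re-slicing every line once per variable.
import Mathlib
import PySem

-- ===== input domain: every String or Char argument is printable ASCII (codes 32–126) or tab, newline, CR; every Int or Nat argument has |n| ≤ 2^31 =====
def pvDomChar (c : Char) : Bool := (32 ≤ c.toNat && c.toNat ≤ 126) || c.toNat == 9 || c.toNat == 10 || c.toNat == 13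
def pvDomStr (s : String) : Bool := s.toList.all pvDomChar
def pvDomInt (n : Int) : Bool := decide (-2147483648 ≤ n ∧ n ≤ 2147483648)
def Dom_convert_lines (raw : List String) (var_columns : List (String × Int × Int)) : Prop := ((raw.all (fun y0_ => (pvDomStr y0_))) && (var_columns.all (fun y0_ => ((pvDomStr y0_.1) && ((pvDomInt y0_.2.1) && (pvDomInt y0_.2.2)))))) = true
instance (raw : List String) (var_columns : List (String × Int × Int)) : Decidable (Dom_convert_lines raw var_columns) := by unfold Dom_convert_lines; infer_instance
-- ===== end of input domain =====

-- B computes the comma layout once per distinct line length (a memoized template of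
-- character slots) and renders each line in one pass, instead of A's per-line,
-- per-variable string re-slicing.

-- ===== PORT A =====
-- res[line_i] = res[line_i][:char_i] + "," + res[line_i][char_i:]
def spliceA (cs : List Char) (c : Int) : List Char :=
  PySem.List.slice cs none (some c) ++ [','] ++ PySem.List.slice cs (some c) none

def convert_lines (raw : List String) (var_columns : List (String × Int × Int)) : List String :=
  -- res = [line.replace(",", "") for line in raw]; then
  -- for line_i in range(len(res)): for var in sorted(var_columns, key=x[1], reverse=True):
  --   res[line_i] = res[line_i][:var[1]] + "," + res[line_i][var[1]:]
  (PySem.List.pyRange 0 (PySem.List.len (raw.map (fun line => PySem.Str.replace line "," "")))).foldl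
    (fun r li => PySem.List.pySetD r li
      (String.ofList ((PySem.List.sorted var_columns (fun x => x.2.1) true).foldl
        (fun t v => spliceA t v.2.1) (PySem.List.pyGetD r li "").toList)))
    (raw.map (fun line => PySem.Str.replace line "," ""))

-- ===== PORT B =====
-- slots = list(range(length)); for p in cols: slots.insert(p, None)
def lineTemplate (cols : List Int) (L : Int) : List (Option Int) :=
  cols.foldl (fun slots p => PySem.List.insert slots p none) ((PySem.List.pyRange 0 L).map some)

-- "," if i is None else s[i]   (s[i] is always in range: i comes from range(len(s)))
def decSlot (cs : List Char) (o : Option Int) : Char :=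
  match o with
  | none => ','
  | some i => PySem.List.pyGetD cs i ','

-- "".join("," if i is None else s[i] for i in template)
def renderLine (s : String) (t : List (Option Int)) : String :=
  String.ofList (t.map (decSlot s.toList))

def convert_lines_alt (raw : List String) (var_columns : List (String × Int × Int)) : List String :=
  -- cols = sorted((var[1] for var in var_columns), reverse=True)
  let cols := PySem.List.sorted (var_columns.map (fun v => v.2.1)) (fun x => x) true
  -- stripped = [line.replace(",", "") for line in raw]
  let stripped := raw.map (fun line => PySem.Str.replace line "," "")
  -- templates = {}; res = []; for s in stripped: …
  (stripped.foldl
    (fun (st : PySem.Dict Int (List (Option Int)) × List String) s =>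
      let L := PySem.Str.len s
      let d := if st.1.contains L then st.1 else st.1.insert L (lineTemplate cols L)
      (d, st.2 ++ [renderLine s (d.getD L [])]))
    (PySem.Dict.empty, [])).2

-- ===== PRECONDITION & SPEC =====
def Spec_convert_lines (raw : List String) (var_columns : List (String × Int × Int)) (out : List String) : Prop := out = convert_lines_alt raw var_columns
instance (raw : List String) (var_columns : List (String × Int × Int)) (out : List String) : Decidable (Spec_convert_lines raw var_columns out) := by unfold Spec_convert_lines; infer_instance

-- ===== CLAIM (what is proved, stated in full; the proofs are below) =====
def Claim_equal_convert_lines : Prop := ∀ (raw : List String) (var_columns : List (String × Int × Int)), Dom_convert_lines raw var_columns → Spec_convert_lines raw var_columns (convert_lines raw var_columns)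

-- ===== LEMMAS AND PROOFS =====

theorem foldl_set_map_aux {α : Type} (d : α) (f : α → α) (zs : List α) : ∀ (ys : List α),
    (PySem.List.pyRange (ys.length : Int) ((ys.length + zs.length : Nat) : Int)).foldl
      (fun r li => PySem.List.pySetD r li (f (PySem.List.pyGetD r li d))) (ys ++ zs)
      = ys ++ zs.map f := by
  induction zs with
  | nil =>
    intro ys
    simp [PySem.List.pyRange]
  | cons z zs ih =>
    intro ys
    have hlt : (ys.length : Int) < ((ys.length + (z :: zs).length : Nat) : Int) := by
      simp only [List.length_cons]
      push_cast
      omega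
    rw [PySem.List.pyRange_one_cons hlt]
    simp only [List.foldl_cons]
    have hget : PySem.List.pyGetD (ys ++ z :: zs) (ys.length : Int) d = z := by
      rw [PySem.List.pyGetD_natCast]
      simp [List.getD]
    have hset : PySem.List.pySetD (ys ++ z :: zs) (ys.length : Int) (f z) = ys ++ f z :: zs := by
      rw [PySem.List.pySetD_natCast]
      rw [List.set_append_right ys.length (f z) Nat.le.refl]
      simp
    rw [hget, hset]
    have harr : (ys.length : Int) + 1 = (((ys ++ [f z]).length : Nat) : Int) := by
      simp
    have harr2 : ((ys.length + (z :: zs).length : Nat) : Int)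
        = (((ys ++ [f z]).length + zs.length : Nat) : Int) := by
      simp; omega
    rw [harr, harr2, show ys ++ f z :: zs = (ys ++ [f z]) ++ zs by simp]
    rw [ih (ys ++ [f z])]
    simp

theorem foldl_set_map {α : Type} (d : α) (f : α → α) (xs : List α) :
    (PySem.List.pyRange 0 (PySem.List.len xs)).foldl
      (fun r li => PySem.List.pySetD r li (f (PySem.List.pyGetD r li d))) xs = xs.map f := by
  have h := foldl_set_map_aux d f xs []
  simpa [PySem.List.len_eq] using h

theorem ins_eq {α : Type} (xs : List α) (i : Int) (v : α) :
    PySem.List.insert xs i v = xs.take (PySem.List.clampIdx xs.length i) ++ v :: xs.drop (PySem.List.clampIdx xs.length i) := by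
  have key : ∀ (a b : Nat), a = b → xs.take a ++ v :: xs.drop a = xs.take b ++ v :: xs.drop b := by
    intro a b h; rw [h]
  simp only [PySem.List.insert, PySem.List.sliceIndices, PySem.List.clampIdx]
  split_ifs
  all_goals apply key
  all_goals omega

theorem spliceA_eq (cs : List Char) (c : Int) :
    spliceA cs c = cs.take (PySem.List.clampIdx cs.length c) ++
      ',' :: cs.drop (PySem.List.clampIdx cs.length c) := by
  simp only [spliceA, PySem.List.slice]
  simp

theorem spliceA_insert (cs : List Char) (c : Int) :
    spliceA cs c = PySem.List.insert cs c ',' := by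
  rw [spliceA_eq, ins_eq]

theorem map_pyInsert {α β : Type} (f : α → β) (t : List α) (p : Int) (x : α) :
    (PySem.List.insert t p x).map f = PySem.List.insert (t.map f) p (f x) := by
  rw [ins_eq, ins_eq]
  simp [List.map_take, List.map_drop]

theorem range_getD (d : Char) (cs : List Char) :
    (PySem.List.pyRange 0 ((cs.length : Nat) : Int)).map (fun j => PySem.List.pyGetD cs j d) = cs := by
  have h1 := PySem.List.enumerate_eq_map_pyRange (xs := cs) (d := d)
  have h2 := congrArg (List.map (·.2)) h1
  rw [PySem.List.map_snd_enumerate, List.map_map] at h2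
  rw [show ((cs.length : Nat) : Int) = PySem.List.len cs by simp [PySem.List.len_eq]]
  exact h2.symm

theorem foldl_insert_decode (cs : List Char) (cols : List Int) : ∀ (t : List (Option Int)),
    (cols.foldl (fun slots p => PySem.List.insert slots p none) t).map (decSlot cs)
      = cols.foldl spliceA (t.map (decSlot cs)) := by
  induction cols with
  | nil => intro t; rfl
  | cons p ps ih =>
    intro t
    simp only [List.foldl_cons]
    rw [ih, map_pyInsert, show decSlot cs none = ',' from rfl, ← spliceA_insert]

theorem decode_template (cs : List Char) (cols : List Int) :
    (lineTemplate cols ((cs.length : Nat) : Int)).map (decSlot cs) = cols.foldl spliceA cs := by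
  unfold lineTemplate
  rw [foldl_insert_decode, List.map_map]
  have hbase : ((PySem.List.pyRange 0 ((cs.length : Nat) : Int)).map (decSlot cs ∘ some)) = cs := by
    have : decSlot cs ∘ some = fun j => PySem.List.pyGetD cs j ',' := rfl
    rw [this, range_getD]
  rw [hbase]

theorem str_len_eq (s : String) : PySem.Str.len s = ((s.toList.length : Nat) : Int) := by
  simp [PySem.Str.len]

def lineOut (cols : List Int) (s : String) : String :=
  renderLine s (lineTemplate cols (PySem.Str.len s))

theorem fold_memo (cols : List Int) : ∀ (ss : List String)
    (d : PySem.Dict Int (List (Option Int))) (acc : List String),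
    (∀ k : Int, d.contains k = true → d.getD k [] = lineTemplate cols k) →
    (ss.foldl
      (fun (st : PySem.Dict Int (List (Option Int)) × List String) s =>
        let L := PySem.Str.len s
        let d := if st.1.contains L then st.1 else st.1.insert L (lineTemplate cols L)
        (d, st.2 ++ [renderLine s (d.getD L [])]))
      (d, acc)).2 = acc ++ ss.map (lineOut cols) := by
  intro ss
  induction ss with
  | nil => intro d acc _; simp
  | cons s ss ih =>
    intro d acc hinv
    simp only [List.foldl_cons, List.map_cons]
    set L := PySem.Str.len s with hL
    by_cases hc : d.contains L = true
    · rw [if_pos hc]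
      have := hinv L hc
      rw [this]
      rw [ih d (acc ++ [renderLine s (lineTemplate cols L)]) hinv]
      simp [lineOut, hL, PySem.Str.len]
    · rw [if_neg hc]
      have hgd : (d.insert L (lineTemplate cols L)).getD L [] = lineTemplate cols L := by
        rw [PySem.Dict.getD_insert]; simp
      rw [hgd]
      have hinv' : ∀ k : Int, (d.insert L (lineTemplate cols L)).contains k = true →
          (d.insert L (lineTemplate cols L)).getD k [] = lineTemplate cols k := by
        intro k hk
        rw [PySem.Dict.getD_insert]
        by_cases hkL : k = L
        · simp [hkL]
        · rw [if_neg hkL]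
          rw [PySem.Dict.contains_insert] at hk
          simp [hkL] at hk
          exact hinv k hk
      rw [ih _ (acc ++ [renderLine s (lineTemplate cols L)]) hinv']
      simp [lineOut, hL, PySem.Str.len]

theorem sorted_proj (vc : List (String × Int × Int)) :
    (PySem.List.sorted vc (fun x => x.2.1) true).map (fun v => v.2.1)
      = PySem.List.sorted (vc.map (fun v => v.2.1)) (fun x => x) true := by
  have hperm : ((PySem.List.sorted vc (fun x => x.2.1) true).map (fun v => v.2.1)).Perm
      (PySem.List.sorted (vc.map (fun v => v.2.1)) (fun x => x) true) :=
    (List.Perm.map _ (PySem.List.sorted_perm vc _ true)).trans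
      (PySem.List.sorted_perm _ _ true).symm
  have hs1 : ((PySem.List.sorted vc (fun x => x.2.1) true).map (fun v => v.2.1)).Pairwise
      (fun a b : Int => b ≤ a) :=
    (List.pairwise_map).mpr (PySem.List.sorted_pairwise_rev vc (fun x => x.2.1))
  have hs2 : (PySem.List.sorted (vc.map (fun v => v.2.1)) (fun x => x) true).Pairwise
      (fun a b : Int => b ≤ a) :=
    PySem.List.sorted_pairwise_rev (vc.map (fun v => v.2.1)) (fun x => x)
  exact List.Perm.eq_of_pairwise (fun a b _ _ h1 h2 => le_antisymm h2 h1) hs1 hs2 hperm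

-- ===== VERDICT (by name: the statement is the Claim_ definition above) =====
theorem convert_lines_spec : Claim_equal_convert_lines := by
  intro raw vc _
  unfold Spec_convert_lines
  unfold convert_lines convert_lines_alt
  have hA := foldl_set_map (α := String) ""
    (fun s => String.ofList ((PySem.List.sorted vc (fun x => x.2.1) true).foldl
      (fun t v => spliceA t v.2.1) s.toList))
    (raw.map (fun line => PySem.Str.replace line "," ""))
  refine hA.trans ?_
  rw [fold_memo _ _ PySem.Dict.empty [] (by intro k hk; simp [PySem.Dict.empty, PySem.Dict.contains] at hk)]
  rw [List.nil_append, List.map_map, List.map_map]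
  apply List.map_congr_left
  intro line _
  show String.ofList ((PySem.List.sorted vc (fun x => x.2.1) true).foldl
      (fun t v => spliceA t v.2.1) (PySem.Str.replace line "," "").toList)
    = lineOut (PySem.List.sorted (vc.map (fun v => v.2.1)) (fun x => x) true)
        (PySem.Str.replace line "," "")
  set s := PySem.Str.replace line "," ""
  have h1 : (PySem.List.sorted vc (fun x => x.2.1) true).foldl
      (fun t v => spliceA t v.2.1) s.toList
      = ((PySem.List.sorted vc (fun x => x.2.1) true).map (fun v => v.2.1)).foldl
          spliceA s.toList := by simp only [List.foldl_map]
  rw [h1, sorted_proj]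
  unfold lineOut renderLine
  apply congrArg String.ofList
  rw [str_len_eq, decode_template]
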